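-- pv_equiv track=rewrite | github.com/garrynigel/Projects | CNF Converter/CNFconverter.py | find_dup_clauses
-- ===== SOURCE A (Python) =====
-- def find_dup_clauses(clause2,clause1):
--     check_clause = clause1[:]
--     for key in clause2:
--         try:
--             check_clause.remove(key)
--         except ValueError:
--             return False
--     return not check_clause
-- ===== SOURCE B (Python) =====
-- def find_dup_clauses(clause2, clause1):
--     return sorted(clause1) == sorted(clause2)
-- ===== Notes on version B (the rewrite author's own statement) =====
-- stated objective: simpler
-- what changed: Replaced the repeated list.remove scan (copy clause1, remove each key of clause2, test emptiness) by sorting both clauses once and comparing the sorted sequences.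
import Mathlib
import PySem

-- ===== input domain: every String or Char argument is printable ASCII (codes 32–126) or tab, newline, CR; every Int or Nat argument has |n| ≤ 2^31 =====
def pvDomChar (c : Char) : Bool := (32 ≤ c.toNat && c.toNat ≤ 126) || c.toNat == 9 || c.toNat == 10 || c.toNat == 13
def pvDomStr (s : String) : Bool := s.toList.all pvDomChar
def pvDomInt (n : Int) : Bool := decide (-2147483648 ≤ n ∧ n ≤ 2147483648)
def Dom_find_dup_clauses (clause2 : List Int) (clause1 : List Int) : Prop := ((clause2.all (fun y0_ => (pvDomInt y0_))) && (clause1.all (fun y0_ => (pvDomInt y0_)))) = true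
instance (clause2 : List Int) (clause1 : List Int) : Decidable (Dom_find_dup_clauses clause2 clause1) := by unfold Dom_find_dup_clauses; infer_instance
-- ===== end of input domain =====

-- B sorts both clauses once and compares them, instead of A's repeated remove-scan: simpler.

-- ===== PORT A =====
-- the for-loop over clause2 with try: check_clause.remove(key) / except: return False
def find_dup_clauses_loop (check : List Int) : List Int → Bool
  | [] => check.isEmpty          -- "return not check_clause"
  | key :: rest =>
    match PySem.List.remove? check key with
    | none => false              -- ValueError → return False
    | some c => find_dup_clauses_loop c rest

def find_dup_clauses (clause2 : List Int) (clause1 : List Int) : Bool :=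
  find_dup_clauses_loop (PySem.List.slice clause1 none none) clause2   -- check_clause = clause1[:]

-- ===== PORT B =====
def find_dup_clauses_alt (clause2 : List Int) (clause1 : List Int) : Bool :=
  PySem.List.sorted clause1 (fun x => x) false == PySem.List.sorted clause2 (fun x => x) false

-- ===== PRECONDITION & SPEC =====
def Spec_find_dup_clauses (clause2 : List Int) (clause1 : List Int) (out : Bool) : Prop := out = find_dup_clauses_alt clause2 clause1
instance (clause2 : List Int) (clause1 : List Int) (out : Bool) : Decidable (Spec_find_dup_clauses clause2 clause1 out) := by unfold Spec_find_dup_clauses; infer_instance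

-- ===== CLAIM (what is proved, stated in full; the proofs are below) =====
def Claim_equal_find_dup_clauses : Prop := ∀ (clause2 : List Int) (clause1 : List Int), Dom_find_dup_clauses clause2 clause1 → Spec_find_dup_clauses clause2 clause1 (find_dup_clauses clause2 clause1)

-- ===== LEMMAS AND PROOFS =====

-- A's loop decides multiset equality: it returns true iff check is a permutation of l2
theorem find_dup_clauses_loop_eq (l2 check : List Int) :
    find_dup_clauses_loop check l2 = decide (check.Perm l2) := by
  induction l2 generalizing check with
  | nil =>
    rw [find_dup_clauses_loop]
    cases check <;> simp
  | cons k rest ih =>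
    by_cases hk : k ∈ check
    · rw [find_dup_clauses_loop, PySem.List.remove?_eq_some_erase check k hk]
      show find_dup_clauses_loop (check.erase k) rest = _
      rw [ih]
      have hperm : check.Perm (k :: check.erase k) := List.perm_cons_erase hk
      have : check.Perm (k :: rest) ↔ (check.erase k).Perm rest := by
        constructor
        · intro h; exact (hperm.symm.trans h).cons_inv
        · intro h; exact hperm.trans (h.cons k)
      simp [this]
    · have : PySem.List.remove? check k = none := (PySem.List.remove?_eq_none_iff _ _).mpr hk
      rw [find_dup_clauses_loop, this]
      have : ¬ check.Perm (k :: rest) := fun h => hk (h.mem_iff.mpr (by simp))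
      simp [this]

-- ===== VERDICT (by name: the statement is the Claim_ definition above) =====
theorem find_dup_clauses_spec : Claim_equal_find_dup_clauses := by
  intro clause2 clause1 _
  unfold Spec_find_dup_clauses find_dup_clauses find_dup_clauses_alt
  rw [PySem.List.slice_none_none, find_dup_clauses_loop_eq]
  by_cases h : clause1.Perm clause2
  · simp [h, (PySem.List.sorted_id_eq_sorted_id_iff_perm _ _).mpr h]
  · have hne : PySem.List.sorted clause1 (fun x => x) false ≠ PySem.List.sorted clause2 (fun x => x) false :=
      fun he => h ((PySem.List.sorted_id_eq_sorted_id_iff_perm _ _).mp he)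
    simp [h, hne]
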